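-- pv_equiv track=rewrite | github.com/chen-qian-dan/Algorithms_And_Data_Structures_20211227Mon | *DSA/43_Dynamic_Programming/415_Number_Factor_use_Dynamic_Programming.py | numberFactor_topDown
-- ===== SOURCE A (Python) =====
-- def numberFactor_topDown(N, dp):
--     if N in [0, 1, 2]:
--         return 1
--     elif N == 3:
--         return 2
--     if N not in dp.keys():
--         dp[N] = numberFactor_topDown(N-1, dp) + numberFactor_topDown(N-3, dp) + numberFactor_topDown(N-4, dp)
--     return dp[N]
-- ===== SOURCE B (Python) =====
-- # Bottom-up dynamic programming: fill the memo table dp iteratively from 4 up to N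
-- # instead of recursing top-down; existing memo entries are kept, missing ones added.
-- def numberFactor_topDown(N, dp):
--     if N <= 2:
--         return 1
--     if N == 3:
--         return 2
--     def val(k):
--         return 1 if k <= 2 else 2 if k == 3 else dp[k]
--     for k in range(4, N + 1):
--         if k not in dp:
--             dp[k] = val(k - 1) + val(k - 3) + val(k - 4)
--     return dp[N]
-- ===== Notes on version B (the rewrite author's own statement) =====
-- stated objective: alternative
-- what changed: A's top-down memoized recursion is replaced by a bottom-up iterative fill of the memo table dp from 4 up to N (no recursion, no call stack); Pre_ excludes negative N, where A recurses without a base case (RecursionError) unless N happens to be a pre-seeded dp key, in which case A echoes that accidental entry.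
-- outside the precondition, e.g. on numberFactor_topDown(-2, {-2: 7}): A returns 7, B returns 1
import Mathlib
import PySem

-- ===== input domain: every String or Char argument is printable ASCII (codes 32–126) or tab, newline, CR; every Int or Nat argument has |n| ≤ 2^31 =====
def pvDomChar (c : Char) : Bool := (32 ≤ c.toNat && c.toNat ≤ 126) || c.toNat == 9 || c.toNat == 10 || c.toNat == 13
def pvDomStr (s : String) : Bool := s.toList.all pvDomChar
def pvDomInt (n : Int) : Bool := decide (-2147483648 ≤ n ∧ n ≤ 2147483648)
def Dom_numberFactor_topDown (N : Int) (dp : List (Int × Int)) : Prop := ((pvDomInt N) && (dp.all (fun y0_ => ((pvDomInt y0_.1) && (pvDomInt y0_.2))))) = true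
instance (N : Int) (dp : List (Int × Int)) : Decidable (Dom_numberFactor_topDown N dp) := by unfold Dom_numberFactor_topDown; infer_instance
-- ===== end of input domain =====

-- B replaces A's top-down memoized recursion by a bottom-up iterative fill of the memo
-- table dp; both Pythons mutate dp in place (not necessarily identically): the equivalence
-- proved here is about the RETURN value only.

-- ===== PORT A =====
-- A's recursion threading the mutable dict: returns (value, updated dict).
def numberFactor_goA (n : Int) (d : PySem.Dict Int Int) : Int × PySem.Dict Int Int :=
  if n = 0 ∨ n = 1 ∨ n = 2 then (1, d)
  else if n = 3 then (2, d)
  else if n < 0 then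
    -- Python: for n < 0 not in dp the recursion never terminates (RecursionError;
    -- excluded by Pre_); when n ∈ dp it returns dp[n], which getD gives here.
    (d.getD n 0, d)
  else if d.contains n then (d.getD n 0, d)
  else
    let r1 := numberFactor_goA (n-1) d
    let r3 := numberFactor_goA (n-3) r1.2
    let r4 := numberFactor_goA (n-4) r3.2
    let s := r1.1 + r3.1 + r4.1
    (s, r4.2.insert n s)
termination_by n.toNat
decreasing_by all_goals omega

def numberFactor_topDown (N : Int) (dp : List (Int × Int)) : Int :=
  (numberFactor_goA N (PySem.Dict.mk dp)).1

-- ===== PORT B =====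
-- B's helper val(k); Python's dp[k] is only reached for keys the loop has already
-- filled (k in 4..N), so getD's default is never the result — exact on those calls.
def numberFactor_valB (d : PySem.Dict Int Int) (k : Int) : Int :=
  if k ≤ 2 then 1 else if k = 3 then 2 else d.getD k 0

def numberFactor_stepB (d : PySem.Dict Int Int) (k : Int) : PySem.Dict Int Int :=
  if d.contains k then d
  else d.insert k (numberFactor_valB d (k-1) + numberFactor_valB d (k-3) + numberFactor_valB d (k-4))

def numberFactor_topDown_alt (N : Int) (dp : List (Int × Int)) : Int :=
  if N ≤ 2 then 1
  else if N = 3 then 2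
  else ((PySem.List.pyRange 4 (N+1) 1).foldl numberFactor_stepB (PySem.Dict.mk dp)).getD N 0

-- ===== PRECONDITION & SPEC =====
-- Pre_ excludes negative N, where A recurses without a base case (RecursionError)
-- unless N happens to be a pre-seeded dp key, in which case A echoes that accidental entry.
def Pre_numberFactor_topDown (N : Int) (dp : List (Int × Int)) : Prop := 0 ≤ N
instance (N : Int) (dp : List (Int × Int)) : Decidable (Pre_numberFactor_topDown N dp) := by unfold Pre_numberFactor_topDown; infer_instance
def pvWitness_numberFactor_topDown : Int × (List (Int × Int)) := (7, [(5, 3)])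

def Spec_numberFactor_topDown (N : Int) (dp : List (Int × Int)) (out : Int) : Prop := out = numberFactor_topDown_alt N dp
instance (N : Int) (dp : List (Int × Int)) (out : Int) : Decidable (Spec_numberFactor_topDown N dp out) := by unfold Spec_numberFactor_topDown; infer_instance

-- ===== CLAIM =====
def Claim_equal_numberFactor_topDown : Prop := ∀ (N : Int) (dp : List (Int × Int)), Dom_numberFactor_topDown N dp → Pre_numberFactor_topDown N dp → Spec_numberFactor_topDown N dp (numberFactor_topDown N dp)

-- ===== LEMMAS AND PROOFS =====

-- The memoized recurrence value over the ORIGINAL dict d (intermediate spec for A).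
def numberFactor_f (d : PySem.Dict Int Int) (n : Int) : Int :=
  if n ≤ 2 then 1
  else if n = 3 then 2
  else d.getD n (numberFactor_f d (n-1) + numberFactor_f d (n-3) + numberFactor_f d (n-4))
termination_by n.toNat
decreasing_by all_goals omega

-- Invariant on the threaded dict: every stored value is the original entry if the key was
-- originally present, and the recurrence value otherwise.
def numberFactor_Good (d0 d : PySem.Dict Int Int) : Prop :=
  (∀ k, d0.contains k = true → d.contains k = true) ∧
  (∀ k v, d.get? k = some v → v = (d0.get? k).getD (numberFactor_f d0 k))

theorem numberFactor_f_base (d : PySem.Dict Int Int) (n : Int) (h : n ≤ 2) :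
    numberFactor_f d n = 1 := by
  rw [numberFactor_f, if_pos h]

theorem numberFactor_f_three (d : PySem.Dict Int Int) : numberFactor_f d 3 = 2 := by
  rw [numberFactor_f]; norm_num

theorem numberFactor_goA_correct (d0 : PySem.Dict Int Int) :
    ∀ (n : Int) (d : PySem.Dict Int Int), 0 ≤ n → numberFactor_Good d0 d →
      (numberFactor_goA n d).1 = numberFactor_f d0 n ∧ numberFactor_Good d0 (numberFactor_goA n d).2 := by
  intro n d
  induction n, d using numberFactor_goA.induct with
  | case1 n d h =>
    intro _ hG
    rw [numberFactor_goA, if_pos h]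
    exact ⟨(numberFactor_f_base d0 n (by omega)).symm, hG⟩
  | case2 d h1 =>
    intro _ hG
    rw [numberFactor_goA, if_neg h1, if_pos rfl]
    exact ⟨(numberFactor_f_three d0).symm, hG⟩
  | case3 n d h1 h2 h3 =>
    intro hn _
    omega
  | case4 n d h1 h2 h3 h4 =>
    intro _ hG
    rw [numberFactor_goA, if_neg h1, if_neg h2, if_neg h3, if_pos h4]
    refine ⟨?_, hG⟩
    have hsome : ∃ v, d.get? n = some v := by
      have := PySem.Dict.contains_eq_isSome_get? (d := d) (k := n)
      rw [h4] at this
      exact Option.isSome_iff_exists.mp this.symm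
    obtain ⟨v, hv⟩ := hsome
    have hval := hG.2 n v hv
    have hgetD : d.getD n 0 = v := PySem.Dict.getD_of_get?_eq_some d 0 hv
    rw [hgetD, hval]
    rw [numberFactor_f]
    have c1 : ¬ n ≤ 2 := by omega
    rw [if_neg c1, if_neg h2]
    cases h0 : d0.get? n with
    | none => simp [PySem.Dict.getD_eq_get?_getD, h0]
    | some w => simp [PySem.Dict.getD_eq_get?_getD, h0]
  | case5 n d h1 h2 h3 h4 r1 r3 ih1 ih3a ih3b ih4 =>
    intro _ hG
    have hr1 := ih1 (by omega) hG
    have hr3 := ih3b (by omega) hr1.2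
    have hr4 := ih4 (by omega) hr3.2
    rw [numberFactor_goA, if_neg h1, if_neg h2, if_neg h3, if_neg h4]
    simp only
    have hn0 : d0.contains n = false := by
      cases hc : d0.contains n with
      | true => exact absurd (hG.1 n hc) (by simp [h4])
      | false => rfl
    have hfn : numberFactor_f d0 n
        = numberFactor_f d0 (n-1) + numberFactor_f d0 (n-3) + numberFactor_f d0 (n-4) := by
      rw [numberFactor_f]
      have c1 : ¬ n ≤ 2 := by omega
      rw [if_neg c1, if_neg h2, PySem.Dict.getD_of_not_contains _ _ hn0]
    constructor
    · rw [hr1.1, hr3.1, hr4.1, hfn]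
    · constructor
      · intro k hk
        have hk4 := hr4.2.1 k hk
        rw [PySem.Dict.contains_insert]
        simp only [Bool.or_eq_true, beq_iff_eq]
        exact Or.inr hk4
      · intro k v hkv
        rw [PySem.Dict.get?_insert] at hkv
        by_cases hk : k = n
        · rw [if_pos hk] at hkv
          injection hkv with hkv
          subst hk
          have hnone : d0.get? k = none := by
            rw [PySem.Dict.get?_eq_none_iff_contains]
            exact hn0
          rw [hnone, ← hkv, hr1.1, hr3.1, hr4.1, hfn]
          rfl
        · rw [if_neg hk] at hkv
          exact hr4.2.2 k v hkv

-- B's loop invariant: after the range [4, 4+j) the table holds the original entry for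
-- originally present keys and the recurrence value f for the freshly filled keys.
theorem numberFactor_loopB (d0 : PySem.Dict Int Int) (j : Nat) :
    ∀ k : Int, ((PySem.List.pyRange 4 (4 + (j : Int)) 1).foldl numberFactor_stepB d0).get? k
      = if d0.contains k then d0.get? k
        else if 4 ≤ k ∧ k ≤ (j : Int) + 3 then some (numberFactor_f d0 k) else none := by
  induction j with
  | zero =>
    intro k
    rw [PySem.List.pyRange_one_eq_nil (by omega)]
    simp only [List.foldl_nil, Nat.cast_zero]
    cases hc : d0.contains k with
    | true => rw [if_pos rfl]
    | false =>
      rw [if_neg (by simp), if_neg (by omega), PySem.Dict.get?_eq_none_iff_contains]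
      exact hc
  | succ m ih =>
    intro k
    have hsplit : (4 + ((m + 1 : Nat) : Int)) = (4 + (m : Int)) + 1 := by push_cast; ring
    rw [hsplit, PySem.List.pyRange_one_succ_right (by omega), List.foldl_append]
    simp only [List.foldl_cons, List.foldl_nil]
    set d := (PySem.List.pyRange 4 (4 + (m : Int)) 1).foldl numberFactor_stepB d0 with hd
    -- the filled table evaluates val at any already-covered key to f d0
    have hval : ∀ x : Int, x ≤ (m : Int) + 3 → numberFactor_valB d x = numberFactor_f d0 x := by
      intro x hx
      unfold numberFactor_valB
      by_cases hx2 : x ≤ 2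
      · rw [if_pos hx2, numberFactor_f_base d0 x hx2]
      · by_cases hx3 : x = 3
        · rw [if_neg hx2, if_pos hx3, hx3, numberFactor_f_three]
        · rw [if_neg hx2, if_neg hx3, PySem.Dict.getD_eq_get?_getD, ih x]
          cases h0 : d0.contains x with
          | true =>
            rw [if_pos rfl]
            rw [numberFactor_f, if_neg hx2, if_neg hx3, PySem.Dict.getD_eq_get?_getD]
            have hco := PySem.Dict.contains_eq_isSome_get? (d := d0) (k := x)
            rw [h0] at hco
            obtain ⟨v, hv⟩ := Option.isSome_iff_exists.mp hco.symm
            rw [hv]; rfl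
          | false =>
            rw [if_neg (by simp), if_pos ⟨by omega, hx⟩]
            rfl
    have hcont : d.contains (4 + (m : Int)) = (d0.contains (4 + (m : Int))) := by
      have := PySem.Dict.contains_eq_isSome_get? (d := d) (k := 4 + (m : Int))
      rw [this, ih (4 + (m : Int))]
      cases h0 : d0.contains (4 + (m : Int)) with
      | true =>
        rw [if_pos rfl, ← PySem.Dict.contains_eq_isSome_get?, h0]
      | false =>
        rw [if_neg (by simp), if_neg (by omega)]
        rfl
    unfold numberFactor_stepB
    cases h0 : d0.contains (4 + (m : Int)) with
    | true =>
      rw [hcont, h0, if_pos rfl, ih k]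
      by_cases hk : d0.contains k = true
      · rw [if_pos hk, if_pos hk]
      · rw [if_neg hk, if_neg hk]
        by_cases hkr : 4 ≤ k ∧ k ≤ (m : Int) + 3
        · rw [if_pos hkr, if_pos ⟨hkr.1, by push_cast; omega⟩]
        · rw [if_neg hkr]
          by_cases hkr' : 4 ≤ k ∧ k ≤ ((m + 1 : Nat) : Int) + 3
          · -- k = 4 + m, the key just (not) inserted — but d0 doesn't contain it and
            -- this is the branch where d0 DOES contain 4 + m, so k ≠ 4 + m is impossible
            have hk4 : k = 4 + (m : Int) := by push_cast at hkr' ⊢; omega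
            rw [hk4] at hk
            exact absurd h0 hk
          · rw [if_neg hkr']
    | false =>
      rw [hcont, h0, if_neg (by simp)]
      rw [PySem.Dict.get?_insert]
      by_cases hk : k = 4 + (m : Int)
      · subst hk
        rw [if_pos rfl, if_neg (by simp [h0]), if_pos ⟨by omega, by push_cast; omega⟩]
        have hf : numberFactor_f d0 (4 + (m : Int))
            = numberFactor_f d0 (4 + (m : Int) - 1) + numberFactor_f d0 (4 + (m : Int) - 3)
              + numberFactor_f d0 (4 + (m : Int) - 4) := by
          rw [numberFactor_f]
          have c1 : ¬ (4 : Int) + (m : Int) ≤ 2 := by omega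
          have c2 : (4 : Int) + (m : Int) ≠ 3 := by omega
          rw [if_neg c1, if_neg c2, PySem.Dict.getD_of_not_contains _ _ h0]
        rw [hval _ (by omega), hval _ (by omega), hval _ (by omega), hf]
      · rw [if_neg hk, ih k]
        by_cases hk0 : d0.contains k = true
        · rw [if_pos hk0, if_pos hk0]
        · rw [if_neg hk0, if_neg hk0]
          by_cases hkr : 4 ≤ k ∧ k ≤ (m : Int) + 3
          · rw [if_pos hkr, if_pos ⟨hkr.1, by push_cast; omega⟩]
          · rw [if_neg hkr, if_neg (by push_cast at hkr ⊢; omega)]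

theorem numberFactor_alt_eq_f (N : Int) (dp : List (Int × Int)) (h : 4 ≤ N) :
    numberFactor_topDown_alt N dp = numberFactor_f (PySem.Dict.mk dp) N := by
  unfold numberFactor_topDown_alt
  rw [if_neg (by omega), if_neg (by omega)]
  have hj : N + 1 = 4 + (((N - 3).toNat : Nat) : Int) := by omega
  rw [PySem.Dict.getD_eq_get?_getD, hj, numberFactor_loopB (PySem.Dict.mk dp) (N - 3).toNat N]
  cases h0 : (PySem.Dict.mk dp).contains N with
  | true =>
    rw [if_pos rfl]
    conv_rhs => rw [numberFactor_f]
    rw [if_neg (by omega), if_neg (by omega), PySem.Dict.getD_eq_get?_getD]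
    have hco := PySem.Dict.contains_eq_isSome_get? (d := PySem.Dict.mk dp) (k := N)
    rw [h0] at hco
    obtain ⟨v, hv⟩ := Option.isSome_iff_exists.mp hco.symm
    rw [hv]; rfl
  | false =>
    rw [if_neg (by simp), if_pos ⟨h, by omega⟩]
    rfl

-- ===== VERDICT =====
theorem numberFactor_topDown_spec : Claim_equal_numberFactor_topDown := by
  intro N dp _ hPre
  unfold Spec_numberFactor_topDown
  unfold Pre_numberFactor_topDown at hPre
  by_cases h2 : N ≤ 2
  · unfold numberFactor_topDown numberFactor_topDown_alt
    rw [numberFactor_goA]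
    have : N = 0 ∨ N = 1 ∨ N = 2 := by omega
    rw [if_pos this, if_pos h2]
  · by_cases h3 : N = 3
    · unfold numberFactor_topDown numberFactor_topDown_alt
      subst h3
      rw [numberFactor_goA]
      norm_num
    · have h4 : 4 ≤ N := by omega
      have hGood : numberFactor_Good (PySem.Dict.mk dp) (PySem.Dict.mk dp) := by
        constructor
        · intro k hk; exact hk
        · intro k v hkv; rw [hkv]; rfl
      have hA := (numberFactor_goA_correct (PySem.Dict.mk dp) N (PySem.Dict.mk dp) hPre hGood).1
      unfold numberFactor_topDown
      rw [hA, numberFactor_alt_eq_f N dp h4]
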